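-- pv_equiv track=rewrite | github.com/Tikos1099/carousel-allocation-tool | allocator_utils.py | _wide_only_possible
-- ===== SOURCE A (Python) =====
-- from typing import Dict, List, Optional, Tuple
--
-- def _wide_only_possible(
--     free: Dict[str, Dict[str, int]],
--     positions: int,
--     max_carousels: int,
-- ) -> bool:
--     if max_carousels <= 0:
--         return False
--     caps = [int(v.get("wide", 0)) for v in free.values()]
--     if not caps:
--         return False
--     caps.sort(reverse=True)
--     return sum(caps[: min(max_carousels, len(caps))]) >= positions
-- ===== SOURCE B (Python) =====
-- def _wide_only_possible(free, positions, max_carousels):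
--     if max_carousels <= 0 or not free:
--         return False
--     top = []  # ascending list of the (at most) max_carousels largest wide-capacities seen
--     for v in free.values():
--         c = int(v.get("wide", 0))
--         i = 0
--         while i < len(top) and top[i] < c:
--             i += 1
--         top.insert(i, c)
--         if len(top) > max_carousels:
--             top.pop(0)
--     return sum(top) >= positions
-- ===== Notes on version B (the rewrite author's own statement) =====
-- stated objective: alternative
-- what changed: Replaces build-list+full-sort+slice with a single pass that maintains a bounded ascending buffer of the top max_carousels capacities (insert in order, drop the smallest on overflow) and compares its sum.
import Mathlib
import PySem

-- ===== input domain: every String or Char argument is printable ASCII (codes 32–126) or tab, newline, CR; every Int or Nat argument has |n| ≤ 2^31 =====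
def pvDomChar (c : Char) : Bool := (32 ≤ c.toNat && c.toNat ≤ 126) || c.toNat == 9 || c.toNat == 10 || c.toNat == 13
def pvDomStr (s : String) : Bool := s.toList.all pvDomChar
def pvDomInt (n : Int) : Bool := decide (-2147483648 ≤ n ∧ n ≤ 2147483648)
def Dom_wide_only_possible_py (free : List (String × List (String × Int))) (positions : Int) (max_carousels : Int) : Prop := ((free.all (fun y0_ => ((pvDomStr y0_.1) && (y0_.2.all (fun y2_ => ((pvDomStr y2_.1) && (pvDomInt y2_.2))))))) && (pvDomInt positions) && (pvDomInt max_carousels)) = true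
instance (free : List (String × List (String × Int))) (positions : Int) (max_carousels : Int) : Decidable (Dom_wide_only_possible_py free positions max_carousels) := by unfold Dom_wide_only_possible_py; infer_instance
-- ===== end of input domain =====

-- B replaces sort-then-slice by a one-pass bounded top-k selection buffer (alternative decomposition, same results).

-- ===== PORT A =====
def wide_only_possible_py (free : List (String × List (String × Int))) (positions : Int) (max_carousels : Int) : Bool :=
  if max_carousels ≤ 0 then false
  else
    let caps : List Int := (PySem.Dict.ofList free).values.map (fun v => (PySem.Dict.ofList v).getD "wide" 0)
    if caps = [] then false
    else
      let caps' := PySem.List.sorted caps (fun x => x) true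
      decide (positions ≤ (PySem.List.slice caps' none (some (min max_carousels (caps.length : Int)))).sum)

-- ===== PORT B =====
-- the while-loop + list.insert of Source B: insert c into the ascending list before the first element ≥ c
def pvInsAsc (c : Int) : List Int → List Int
  | [] => [c]
  | y :: ys => if y < c then y :: pvInsAsc c ys else c :: y :: ys

def wide_only_possible_py_alt (free : List (String × List (String × Int))) (positions : Int) (max_carousels : Int) : Bool :=
  if max_carousels ≤ 0 || decide ((PySem.Dict.ofList free).items = []) then false
  else
    let top := (PySem.Dict.ofList free).values.foldl (fun top v =>
      let c := (PySem.Dict.ofList v).getD "wide" 0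
      let t := pvInsAsc c top
      if max_carousels < (t.length : Int) then t.tail else t) []
    decide (positions ≤ top.sum)

-- ===== PRECONDITION & SPEC =====
def Spec_wide_only_possible_py (free : List (String × List (String × Int))) (positions : Int) (max_carousels : Int) (out : Bool) : Prop := out = wide_only_possible_py_alt free positions max_carousels
instance (free : List (String × List (String × Int))) (positions : Int) (max_carousels : Int) (out : Bool) : Decidable (Spec_wide_only_possible_py free positions max_carousels out) := by unfold Spec_wide_only_possible_py; infer_instance

-- ===== CLAIM (what is proved, stated in full; the proofs are below) =====
def Claim_equal_wide_only_possible_py : Prop := ∀ (free : List (String × List (String × Int))) (positions : Int) (max_carousels : Int), Dom_wide_only_possible_py free positions max_carousels → Spec_wide_only_possible_py free positions max_carousels (wide_only_possible_py free positions max_carousels)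

-- ===== LEMMAS AND PROOFS =====

theorem pvInsAsc_eq (c : Int) (l : List Int) :
    pvInsAsc c l = List.orderedInsert (· ≤ ·) c l := by
  induction l with
  | nil => rfl
  | cons y ys ih =>
    simp only [pvInsAsc, List.orderedInsert]
    by_cases h : y < c
    · rw [if_pos h, if_neg (by omega), ih]
    · rw [if_neg h, if_pos (by omega)]

-- inserting below head when c is ≤ everything
theorem tail_orderedInsert_of_le (c : Int) (l : List Int) (h : ∀ y ∈ l, c ≤ y) :
    (List.orderedInsert (· ≤ ·) c l).tail = l := by
  cases l with
  | nil => rfl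
  | cons y ys =>
    simp only [List.orderedInsert]
    rw [if_pos (h y (by simp))]
    rfl

-- dropping commutes with ordered insertion into a sorted list
theorem drop_orderedInsert (c : Int) (S : List Int) (hS : S.Pairwise (· ≤ ·)) :
    ∀ d : ℕ, (List.orderedInsert (· ≤ ·) c S).drop (d + 1)
      = (List.orderedInsert (· ≤ ·) c (S.drop d)).tail := by
  induction S with
  | nil => intro d; simp [List.orderedInsert]
  | cons y ys ih =>
    intro d
    have hys : ys.Pairwise (· ≤ ·) := (List.pairwise_cons.mp hS).2
    have hyall : ∀ z ∈ ys, y ≤ z := (List.pairwise_cons.mp hS).1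
    simp only [List.orderedInsert]
    by_cases h : c ≤ y
    · rw [if_pos h]
      cases d with
      | zero =>
        simp only [List.drop_zero, List.drop_succ_cons, List.drop_zero, List.orderedInsert]
        rw [if_pos h]
        rfl
      | succ d' =>
        simp only [List.drop_succ_cons]
        rw [tail_orderedInsert_of_le c (ys.drop d')
          (fun z hz => le_trans h (hyall z (List.mem_of_mem_drop hz)))]
    · rw [if_neg h]
      cases d with
      | zero =>
        simp only [List.drop_succ_cons, List.drop_zero, List.orderedInsert]
        rw [if_neg h]
        rfl
      | succ d' =>
        simp only [List.drop_succ_cons]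
        exact ih hys d'

-- the selection-buffer invariant: after folding l, the buffer is the k largest elements, ascending
-- the selection-buffer invariant: after folding l, the buffer is the k largest elements, ascending
theorem pvBuffer_inv (k : ℕ) (hk : 1 ≤ k) (l : List Int) :
    l.foldl (fun top c =>
        let t := List.orderedInsert (· ≤ ·) c top
        if k < t.length then t.tail else t) []
      = (List.insertionSort (· ≤ ·) l).drop (l.length - k) := by
  induction l using List.reverseRecOn with
  | nil => simp
  | append_singleton p x ih =>
    rw [List.foldl_append, List.foldl_cons, List.foldl_nil, ih]
    have hlen : (List.insertionSort (· ≤ ·) p).length = p.length :=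
      List.length_insertionSort _ p
    have hsorted : (List.insertionSort (· ≤ ·) p).Pairwise (· ≤ ·) :=
      List.pairwise_insertionSort _ p
    have hins : List.insertionSort (· ≤ ·) (p ++ [x])
        = List.orderedInsert (· ≤ ·) x (List.insertionSort (· ≤ ·) p) := by
      refine List.Perm.eq_of_pairwise (fun a b _ _ h1 h2 => le_antisymm h1 h2)
        (List.pairwise_insertionSort _ _)
        (List.Pairwise.orderedInsert x _ hsorted) ?_
      exact (List.perm_insertionSort _ _).trans
        ((List.perm_append_singleton x p).trans
          (((List.perm_insertionSort _ p).symm.cons x).trans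
            (List.perm_orderedInsert _ x _).symm))
    show (if k < (List.orderedInsert (· ≤ ·) x
            ((List.insertionSort (· ≤ ·) p).drop (p.length - k))).length then
          (List.orderedInsert (· ≤ ·) x
            ((List.insertionSort (· ≤ ·) p).drop (p.length - k))).tail
        else List.orderedInsert (· ≤ ·) x
            ((List.insertionSort (· ≤ ·) p).drop (p.length - k)))
      = (List.insertionSort (· ≤ ·) (p ++ [x])).drop ((p ++ [x]).length - k)
    rw [hins]
    have hslen : ((List.insertionSort (· ≤ ·) p).drop (p.length - k)).length
        = p.length - (p.length - k) := by rw [List.length_drop, hlen]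
    have hl2 : (p ++ [x]).length = p.length + 1 := by simp
    by_cases h : k ≤ p.length
    · rw [if_pos (by rw [List.orderedInsert_length, hslen]; omega)]
      rw [← drop_orderedInsert x _ hsorted (p.length - k)]
      congr 1
      omega
    · rw [if_neg (by rw [List.orderedInsert_length, hslen]; omega)]
      have h1 : p.length - k = 0 := by omega
      have h2 : (p ++ [x]).length - k = 0 := by omega
      rw [h1, h2, List.drop_zero, List.drop_zero]

-- A's descending sort is the reverse of the ascending insertion sort
theorem sorted_rev_eq_reverse_insertionSort (caps : List Int) :
    PySem.List.sorted caps (fun x => x) true = (List.insertionSort (· ≤ ·) caps).reverse := by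
  refine List.Perm.eq_of_pairwise (le := fun a b : Int => b ≤ a)
    (fun a b _ _ h1 h2 => le_antisymm h2 h1) ?_ ?_ ?_
  · exact PySem.List.sorted_pairwise_rev caps (fun x => x)
  · rw [List.pairwise_reverse]
    exact List.pairwise_insertionSort _ caps
  · exact (PySem.List.sorted_perm caps (fun x => x) true).trans
      ((List.perm_insertionSort _ caps).symm.trans (List.reverse_perm _).symm)

-- sum of the top-m slice of the descending sort = sum of the ascending sort minus its low part
theorem sum_take_desc (caps : List Int) (m : ℕ) :
    ((PySem.List.sorted caps (fun x => x) true).take m).sum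
      = ((List.insertionSort (· ≤ ·) caps).drop (caps.length - m)).sum := by
  rw [sorted_rev_eq_reverse_insertionSort, List.take_reverse, List.sum_reverse,
    List.length_insertionSort]

-- ===== VERDICT (by name: the statement is the Claim_ definition above) =====
theorem wide_only_possible_py_spec : Claim_equal_wide_only_possible_py := by
  intro free positions mc _dom
  unfold Spec_wide_only_possible_py wide_only_possible_py wide_only_possible_py_alt
  by_cases hmc : mc ≤ 0
  · rw [if_pos hmc, if_pos (by simp [hmc])]
  · rw [if_neg hmc]
    by_cases hnil : (PySem.Dict.ofList free).items = []
    · rw [if_pos (by simp [PySem.Dict.values, hnil]), if_pos (by simp [hnil])]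
    · have hcne : (PySem.Dict.ofList free).values.map
          (fun v => (PySem.Dict.ofList v).getD "wide" 0) ≠ [] := by
        simp only [PySem.Dict.values, ne_eq, List.map_eq_nil_iff, List.map_eq_nil_iff]
        exact hnil
      rw [if_neg hcne, if_neg (by simp [hmc, hnil])]
      set caps : List Int := (PySem.Dict.ofList free).values.map
          (fun v => (PySem.Dict.ofList v).getD "wide" 0) with hcaps
      set k : ℕ := mc.toNat with hk
      -- B's fold over values = the buffer fold over caps
      have hfold : (PySem.Dict.ofList free).values.foldl (fun top v =>
            let c := (PySem.Dict.ofList v).getD "wide" 0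
            let t := pvInsAsc c top
            if mc < (t.length : Int) then t.tail else t) []
          = caps.foldl (fun top c =>
            let t := List.orderedInsert (· ≤ ·) c top
            if k < t.length then t.tail else t) [] := by
        rw [hcaps, List.foldl_map]
        congr 1
        funext top v
        simp only [pvInsAsc_eq]
        congr 1
        simp only [eq_iff_iff]
        omega
      -- A's sliced sorted sum = the buffer sum
      have hsum : (PySem.List.slice (PySem.List.sorted caps (fun x => x) true) none
            (some (min mc (caps.length : Int)))).sum
          = ((List.insertionSort (· ≤ ·) caps).drop (caps.length - k)).sum := by
        rw [PySem.List.slice_to _ (by omega), sum_take_desc]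
        congr 2
        omega
      show decide (positions ≤ (PySem.List.slice (PySem.List.sorted caps (fun x => x) true) none
            (some (min mc (caps.length : Int)))).sum)
        = decide (positions ≤ ((PySem.Dict.ofList free).values.foldl (fun top v =>
            let c := (PySem.Dict.ofList v).getD "wide" 0
            let t := pvInsAsc c top
            if mc < (t.length : Int) then t.tail else t) []).sum)
      rw [hfold, pvBuffer_inv k (by omega) caps, hsum]
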